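-- pv_equiv track=rewrite | github.com/greenfrog82/DailyCoding | etc/coopang/moving_matrix/src/main.py | get_moving_indexes
-- ===== SOURCE A (Python) =====
-- def get_moving_indexes(inputs):
--     cnt = len(inputs[0])
--
--     repeat_count = [cnt-1, cnt-1, cnt-1, cnt-2]
--     moving_index = [0]
--
--     idx = 0
--     for i, repeat in enumerate(repeat_count):
--         if 0 == i:
--             op = 1
--         elif 1 == i:
--             op = cnt
--         elif 2 == i:
--             op = -1
--         else:
--             op = -cnt
--
--         for _ in range(repeat):
--             idx += op
--             moving_index.append(idx)
--
--     return moving_index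
-- ===== SOURCE B (Python) =====
-- def get_moving_indexes(inputs):
--     cnt = len(inputs[0])
--     right = [1 + k for k in range(cnt - 1)]
--     down = [(cnt - 1) + (k + 1) * cnt for k in range(cnt - 1)]
--     left = [(cnt * cnt - 1) - (k + 1) for k in range(cnt - 1)]
--     up = [cnt * (cnt - 1) - (k + 1) * cnt for k in range(cnt - 2)]
--     return [0] + right + down + left + up
-- ===== Notes on version B (the rewrite author's own statement) =====
-- stated objective: simpler
-- what changed: A walks the spiral border with a mutable index accumulator (op chosen per edge, idx += op repeated); B emits each of the four edges directly as a closed-form arithmetic comprehension and concatenates them onto [0].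
import Mathlib
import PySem

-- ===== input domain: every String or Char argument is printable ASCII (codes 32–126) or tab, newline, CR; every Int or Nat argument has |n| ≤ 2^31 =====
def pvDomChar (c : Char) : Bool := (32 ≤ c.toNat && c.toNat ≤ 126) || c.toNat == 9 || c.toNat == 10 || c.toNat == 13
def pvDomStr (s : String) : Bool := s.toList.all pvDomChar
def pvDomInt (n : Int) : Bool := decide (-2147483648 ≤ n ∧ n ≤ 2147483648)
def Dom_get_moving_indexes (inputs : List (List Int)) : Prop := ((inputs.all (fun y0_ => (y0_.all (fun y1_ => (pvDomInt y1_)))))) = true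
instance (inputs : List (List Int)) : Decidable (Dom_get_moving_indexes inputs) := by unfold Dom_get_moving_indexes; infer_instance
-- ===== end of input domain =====

-- B recomputes the spiral border walk as four closed-form arithmetic edges instead of A's
-- step-by-step index accumulator (objective: simpler); return value only, no mutation involved.

-- ===== PORT A =====
-- A's accumulator loop: for each of the four edges pick op by the edge number, then
-- repeatedly idx += op and append.  Port of the inner 'for _ in range(repeat)'.
def pvAloop (op : Int) (st : List Int × Int) (r : Int) : List Int × Int :=
  (PySem.List.pyRange 0 r 1).foldl (fun t _ => (t.1 ++ [t.2 + op], t.2 + op)) st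

def pvAcore (cnt : Int) : List Int :=
  let repeat_count : List Int := [cnt - 1, cnt - 1, cnt - 1, cnt - 2]
  ((PySem.List.enumerate repeat_count 0).foldl
    (fun st p =>
      let op : Int := if p.1 = 0 then 1 else if p.1 = 1 then cnt else if p.1 = 2 then -1 else -cnt
      pvAloop op st p.2)
    ([0], 0)).1

def get_moving_indexes (inputs : List (List Int)) : List Int :=
  pvAcore ((inputs.headD []).length : Int)   -- inputs[0] raises on []: excluded by Pre_

-- ===== PORT B =====
def pvBcore (cnt : Int) : List Int :=
  let right := (PySem.List.pyRange 0 (cnt - 1) 1).map (fun k => 1 + k)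
  let down  := (PySem.List.pyRange 0 (cnt - 1) 1).map (fun k => (cnt - 1) + (k + 1) * cnt)
  let left  := (PySem.List.pyRange 0 (cnt - 1) 1).map (fun k => (cnt * cnt - 1) - (k + 1))
  let up    := (PySem.List.pyRange 0 (cnt - 2) 1).map (fun k => cnt * (cnt - 1) - (k + 1) * cnt)
  [0] ++ right ++ down ++ left ++ up

def get_moving_indexes_alt (inputs : List (List Int)) : List Int :=
  pvBcore ((inputs.headD []).length : Int)

-- ===== PRECONDITION & SPEC =====
-- Pre_ excludes only the empty outer list, on which A's 'inputs[0]' raises IndexError.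
def Pre_get_moving_indexes (inputs : List (List Int)) : Prop := inputs ≠ []
instance (inputs : List (List Int)) : Decidable (Pre_get_moving_indexes inputs) := by unfold Pre_get_moving_indexes; infer_instance
def pvWitness_get_moving_indexes : List (List Int) := [[1, 2], [3, 4]]
def Spec_get_moving_indexes (inputs : List (List Int)) (out : List Int) : Prop := out = get_moving_indexes_alt inputs
instance (inputs : List (List Int)) (out : List Int) : Decidable (Spec_get_moving_indexes inputs out) := by unfold Spec_get_moving_indexes; infer_instance

-- ===== CLAIM (what is proved, stated in full; the proofs are below) =====
def Claim_equal_get_moving_indexes : Prop := ∀ (inputs : List (List Int)), Dom_get_moving_indexes inputs → Pre_get_moving_indexes inputs → Spec_get_moving_indexes inputs (get_moving_indexes inputs)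

-- ===== LEMMAS AND PROOFS =====

-- A's inner accumulation loop, characterised in closed form.
theorem pvAloop_closed (op idx : Int) (l : List Int) (m : Nat) :
    (List.range m).foldl (fun (t : List Int × Int) _ => (t.1 ++ [t.2 + op], t.2 + op)) (l, idx)
      = (l ++ (List.range m).map (fun k : Nat => idx + ((k : Int) + 1) * op), idx + m * op) := by
  induction m generalizing l idx with
  | zero => simp
  | succ m ih =>
      rw [List.range_succ, List.foldl_append, ih, List.map_append]
      simp only [List.foldl_cons, List.foldl_nil, List.map_cons, List.map_nil,
        List.append_assoc, Prod.mk.injEq]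
      constructor
      · congr 2
        rw [List.cons.injEq]
        exact ⟨by ring, rfl⟩
      · push_cast; ring

theorem pvAloop_eq (op idx : Int) (l : List Int) (r : Int) :
    pvAloop op (l, idx) r
      = (l ++ (List.range r.toNat).map (fun k : Nat => idx + ((k : Int) + 1) * op), idx + r.toNat * op) := by
  unfold pvAloop
  rw [PySem.List.pyRange_one]
  simp only [Int.sub_zero, List.foldl_map]
  exact pvAloop_closed op idx l r.toNat

theorem pvCore_eq (n : Nat) : pvAcore (n : Int) = pvBcore (n : Int) := by
  match n with
  | 0 => decide
  | 1 => decide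
  | (m + 2) =>
    have h1 : ((m + 2 : Nat) : Int) - 1 = ((m + 1 : Nat) : Int) := by push_cast; ring
    have h2 : ((m + 2 : Nat) : Int) - 2 = (m : Int) := by push_cast; ring
    unfold pvAcore pvBcore
    simp only [PySem.List.enumerate_cons, PySem.List.enumerate_nil, List.foldl_cons,
      List.foldl_nil, PySem.List.pyRange_one, Int.sub_zero, h1, h2, Int.toNat_natCast]
    norm_num
    rw [pvAloop_eq, pvAloop_eq, pvAloop_eq, pvAloop_eq]
    have h3 : ((m : Int) + 1).toNat = m + 1 := by omega
    simp only [Int.toNat_natCast, h3, List.append_assoc, List.cons_append,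
      List.nil_append]
    congr 1
    congr 1
    · apply List.map_congr_left; intro k _; simp only [Function.comp_apply]; ring
    congr 1
    · apply List.map_congr_left; intro k _; simp only [Function.comp_apply]; push_cast; ring
    congr 1
    · apply List.map_congr_left; intro k _; simp only [Function.comp_apply]; push_cast; ring
    · apply List.map_congr_left; intro k _; simp only [Function.comp_apply]; push_cast; ring

theorem get_moving_indexes_spec : Claim_equal_get_moving_indexes := by
  intro inputs _ _
  unfold Spec_get_moving_indexes get_moving_indexes get_moving_indexes_alt
  exact pvCore_eq _
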